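-- pv_equiv track=rewrite | github.com/gir2017/tg_bots | sales_manager/bot.py | trim_description
-- ===== SOURCE A (Python) =====
-- def trim_description(description, max_length=1350):
--     """
--     Trims the company description to a specified length by cutting off sentences.
--
--     :param description: The original company description
--     :param max_length: Maximum length of the trimmed description
--     :return: Trimmed company description
--     """
--     # Splitting the description into sentences
--     sentences = description.split('.')
--     trimmed_description = ""
--     total_length = 0
--
--     # Adding sentences until the maximum length is reached
--     for sentence in sentences:
--         # Considering the length of the sentence including a dot and a space
--         sentence_length = len(sentence) + 1
--
--         # Checking if the total length exceeds the maximum allowed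
--         if total_length + sentence_length > max_length:
--             break
--
--         # Adding the sentence to the result
--         trimmed_description += sentence + '.'
--         total_length += sentence_length
--
--     return trimmed_description
-- ===== SOURCE B (Python) =====
-- def trim_description(description, max_length=1350):
--     """Prefix-sum + binary-search re-implementation: build cumulative encoded
--     lengths once, binary-search the cutoff, join the kept sentences."""
--     sentences = description.split('.')
--     cum = []
--     total = 0
--     for s in sentences:
--         total += len(s) + 1
--         cum.append(total)
--     # rightmost k with cum[k-1] <= max_length (cum is strictly increasing)
--     lo, hi = 0, len(cum)
--     while lo < hi:
--         mid = (lo + hi) // 2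
--         if cum[mid] <= max_length:
--             lo = mid + 1
--         else:
--             hi = mid
--     return ''.join(s + '.' for s in sentences[:lo])
-- ===== Notes on version B (the rewrite author's own statement) =====
-- stated objective: alternative
-- what changed: Replaces the lockstep accumulate-and-break loop with a precomputed prefix-sum table of encoded sentence lengths, a binary search for the cutoff count k, and a single join of the first k sentences.
import Mathlib
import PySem

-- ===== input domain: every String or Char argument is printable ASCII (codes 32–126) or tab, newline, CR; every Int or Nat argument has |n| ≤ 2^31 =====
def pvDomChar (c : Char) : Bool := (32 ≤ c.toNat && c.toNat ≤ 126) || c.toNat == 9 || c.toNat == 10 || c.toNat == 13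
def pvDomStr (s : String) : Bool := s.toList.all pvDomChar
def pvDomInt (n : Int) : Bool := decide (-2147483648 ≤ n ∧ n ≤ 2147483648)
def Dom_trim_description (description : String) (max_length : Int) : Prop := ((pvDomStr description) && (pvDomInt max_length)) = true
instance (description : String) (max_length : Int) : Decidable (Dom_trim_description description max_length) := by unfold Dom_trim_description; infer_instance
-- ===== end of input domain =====

-- B replaces A's accumulate-and-break loop by a prefix-sum table, a binary search for the
-- cutoff count, and one join of the kept sentences (objective: alternative, same O(n) cost).


-- ===== PORT A =====
-- A's for-loop with break, as structural recursion over the sentence list carrying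
-- (trimmed_description, total_length); the break returns the accumulator.
def trimLoopA (max_length : Int) : List String → String → Int → String
  | [], acc, _ => acc
  | s :: rest, acc, total =>
    let sentence_length := PySem.Str.len s + 1
    if total + sentence_length > max_length then acc
    else trimLoopA max_length rest (acc ++ s ++ ".") (total + sentence_length)

def trim_description (description : String) (max_length : Int) : String :=
  trimLoopA max_length ((PySem.Str.split? description ".").getD []) "" 0

-- ===== PORT B =====
-- Source B's first loop: cumulative encoded lengths (each entry = running total so far).
def cumLens : List String → Int → List Int
  | [], _ => []
  | s :: rest, total =>
    let t := total + (PySem.Str.len s + 1)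
    t :: cumLens rest t

-- Source B's while-loop binary search; cum[mid] is always in range, ported as getD.
def bsearchCount (cum : List Int) (max_length : Int) (lo hi : Nat) : Nat :=
  if _h : lo < hi then
    if cum.getD ((lo + hi) / 2) 0 ≤ max_length then bsearchCount cum max_length ((lo + hi) / 2 + 1) hi
    else bsearchCount cum max_length lo ((lo + hi) / 2)
  else lo
termination_by hi - lo
decreasing_by all_goals omega

def trim_description_alt (description : String) (max_length : Int) : String :=
  let sentences := (PySem.Str.split? description ".").getD []
  let cum := cumLens sentences 0
  let k := bsearchCount cum max_length 0 cum.length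
  PySem.Str.join "" ((sentences.take k).map (fun s => s ++ "."))

-- ===== PRECONDITION & SPEC =====
def Spec_trim_description (description : String) (max_length : Int) (out : String) : Prop := out = trim_description_alt description max_length
instance (description : String) (max_length : Int) (out : String) : Decidable (Spec_trim_description description max_length out) := by unfold Spec_trim_description; infer_instance

-- ===== CLAIM (what is proved, stated in full; the proofs are below) =====
def Claim_equal_trim_description : Prop := ∀ (description : String) (max_length : Int), Dom_trim_description description max_length → Spec_trim_description description max_length (trim_description description max_length)

-- ===== LEMMAS AND PROOFS =====

-- index (number of sentences) at which A's loop breaks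
def firstExceed (max_length : Int) : List String → Int → Nat
  | [], _ => 0
  | s :: rest, total =>
    if total + (PySem.Str.len s + 1) > max_length then 0
    else 1 + firstExceed max_length rest (total + (PySem.Str.len s + 1))

def joinDots (ss : List String) : String := PySem.Str.join "" (ss.map (fun s => s ++ "."))

theorem join_empty_nil : PySem.Str.join "" [] = "" := rfl

theorem trimLoopA_cons (m : Int) (s : String) (rest : List String) (acc : String) (total : Int) :
    trimLoopA m (s :: rest) acc total =
      if total + (PySem.Str.len s + 1) > m then acc
      else trimLoopA m rest (acc ++ s ++ ".") (total + (PySem.Str.len s + 1)) := rfl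

theorem firstExceed_cons (m : Int) (s : String) (rest : List String) (total : Int) :
    firstExceed m (s :: rest) total =
      if total + (PySem.Str.len s + 1) > m then 0
      else 1 + firstExceed m rest (total + (PySem.Str.len s + 1)) := rfl

theorem cumLens_cons (s : String) (rest : List String) (t : Int) :
    cumLens (s :: rest) t = (t + (PySem.Str.len s + 1)) :: cumLens rest (t + (PySem.Str.len s + 1)) := rfl

theorem flatten_intersperse_nil {α : Type} (l : List (List α)) :
    (List.intersperse ([] : List α) l).flatten = l.flatten := by
  induction l with
  | nil => rfl
  | cons a t ih =>
    cases t with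
    | nil => rfl
    | cons b t2 => simp_all [List.intersperse]

theorem joinDots_cons (s : String) (ss : List String) :
    joinDots (s :: ss) = (s ++ ".") ++ joinDots ss := by
  apply String.toList_injective
  simp [joinDots, PySem.Str.join, PySem.Chars.join, List.intercalate, flatten_intersperse_nil]

-- A's loop builds acc ++ the joined prefix up to the break point
theorem trimLoopA_eq (m : Int) (ss : List String) :
    ∀ (acc : String) (total : Int),
      trimLoopA m ss acc total = acc ++ joinDots (ss.take (firstExceed m ss total)) := by
  induction ss with
  | nil => intro acc total; simp [trimLoopA, firstExceed, joinDots, join_empty_nil]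
  | cons s rest ih =>
    intro acc total
    rw [trimLoopA_cons, firstExceed_cons]
    by_cases h : total + (PySem.Str.len s + 1) > m
    · rw [if_pos h, if_pos h]; simp [joinDots, join_empty_nil]
    · rw [if_neg h, if_neg h, ih]
      have h1 : 1 + firstExceed m rest (total + (PySem.Str.len s + 1)) =
          firstExceed m rest (total + (PySem.Str.len s + 1)) + 1 := by omega
      rw [h1, List.take_succ_cons, joinDots_cons]
      simp [String.append_assoc]

theorem cumLens_length (ss : List String) (t : Int) : (cumLens ss t).length = ss.length := by
  induction ss generalizing t with
  | nil => rfl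
  | cons s rest ih => rw [cumLens_cons]; simp [ih]

theorem str_len_nonneg (s : String) : 0 ≤ PySem.Str.len s := by simp [PySem.Str.len]

-- every entry of cumLens ss t is strictly above t
theorem cumLens_lb (ss : List String) (t : Int) :
    ∀ j, j < ss.length → t < (cumLens ss t).getD j 0 := by
  induction ss generalizing t with
  | nil => intro j hj; simp at hj
  | cons s rest ih =>
    intro j hj
    rw [cumLens_cons]
    cases j with
    | zero => have := str_len_nonneg s; simp only [List.getD_cons_zero]; omega
    | succ j =>
      simp only [List.getD_cons_succ]
      have h1 : t < t + (PySem.Str.len s + 1) := by have := str_len_nonneg s; omega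
      exact lt_trans h1 (ih _ _ (by simpa using hj))

theorem cumLens_mono (ss : List String) (t : Int) :
    ∀ i j, i ≤ j → j < ss.length → (cumLens ss t).getD i 0 ≤ (cumLens ss t).getD j 0 := by
  induction ss generalizing t with
  | nil => intro i j _ hj; simp at hj
  | cons s rest ih =>
    intro i j hij hj
    rw [cumLens_cons]
    cases i with
    | zero =>
      cases j with
      | zero => exact le_refl _
      | succ j =>
        simp only [List.getD_cons_zero, List.getD_cons_succ]
        exact le_of_lt (cumLens_lb rest _ j (by simpa using hj))
    | succ i =>
      cases j with
      | zero => omega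
      | succ j =>
        simp only [List.getD_cons_succ]
        exact ih _ i j (by omega) (by simpa using hj)

-- firstExceed satisfies the "count of prefix sums ≤ m" spec over cumLens
theorem firstExceed_spec (m : Int) (ss : List String) (t : Int) :
    firstExceed m ss t ≤ ss.length ∧
    (∀ j, j < firstExceed m ss t → (cumLens ss t).getD j 0 ≤ m) ∧
    (∀ j, firstExceed m ss t ≤ j → j < ss.length → m < (cumLens ss t).getD j 0) := by
  induction ss generalizing t with
  | nil =>
    refine ⟨Nat.le_refl _, ?_, ?_⟩
    · intro j hj; simp [firstExceed] at hj
    · intro j _ hj; simp at hj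
  | cons s rest ih =>
    rw [firstExceed_cons, cumLens_cons]
    by_cases h : t + (PySem.Str.len s + 1) > m
    · rw [if_pos h]
      refine ⟨by omega, ?_, ?_⟩
      · intro j hj; omega
      · intro j _ hj
        cases j with
        | zero => simpa using h
        | succ j =>
          simp only [List.getD_cons_succ]
          exact lt_trans h (cumLens_lb rest _ j (by simpa using hj))
    · rw [if_neg h]
      obtain ⟨ihl, ih1, ih2⟩ := ih (t + (PySem.Str.len s + 1))
      refine ⟨by simp only [List.length_cons]; omega, ?_, ?_⟩
      · intro j hj
        cases j with
        | zero => simp only [List.getD_cons_zero]; omega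
        | succ j => simp only [List.getD_cons_succ]; exact ih1 j (by omega)
      · intro j hj hlen
        cases j with
        | zero => omega
        | succ j =>
          simp only [List.getD_cons_succ]
          exact ih2 j (by omega) (by simpa using hlen)

-- the binary search satisfies the same spec (fuel d bounds hi - lo)
theorem bsearchCount_spec (cum : List Int) (m : Int)
    (hmono : ∀ i j, i ≤ j → j < cum.length → cum.getD i 0 ≤ cum.getD j 0) :
    ∀ d lo hi, hi - lo ≤ d → lo ≤ hi → hi ≤ cum.length →
      (∀ j, j < lo → cum.getD j 0 ≤ m) →
      (∀ j, hi ≤ j → j < cum.length → m < cum.getD j 0) →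
      (∀ j, j < bsearchCount cum m lo hi → cum.getD j 0 ≤ m) ∧
      (∀ j, bsearchCount cum m lo hi ≤ j → j < cum.length → m < cum.getD j 0) ∧
      bsearchCount cum m lo hi ≤ cum.length := by
  intro d
  induction d with
  | zero =>
    intro lo hi hd hlohi hhile hlo hhi
    have h : ¬ lo < hi := by omega
    rw [bsearchCount, dif_neg h]
    exact ⟨hlo, fun j hj hjl => hhi j (by omega) hjl, by omega⟩
  | succ d ih =>
    intro lo hi hd hlohi hhile hlo hhi
    by_cases h : lo < hi
    · rw [bsearchCount, dif_pos h]
      have hm1 : lo ≤ (lo + hi) / 2 := by omega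
      have hm2 : (lo + hi) / 2 < hi := by omega
      by_cases hc : cum.getD ((lo + hi) / 2) 0 ≤ m
      · rw [if_pos hc]
        exact ih ((lo + hi) / 2 + 1) hi (by omega) (by omega) hhile
          (fun j hj => by
            by_cases hjm : j ≤ (lo + hi) / 2
            · exact le_trans (hmono j ((lo + hi) / 2) hjm (by omega)) hc
            · exact hlo j (by omega))
          hhi
      · rw [if_neg hc]
        rw [not_le] at hc
        exact ih lo ((lo + hi) / 2) (by omega) hm1 (by omega) hlo
          (fun j hj hjlen => lt_of_lt_of_le hc (hmono ((lo + hi) / 2) j hj hjlen))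
    · rw [bsearchCount, dif_neg h]
      exact ⟨hlo, fun j hj hjl => hhi j (by omega) hjl, by omega⟩

-- two numbers satisfying the spec agree
theorem spec_unique (cum : List Int) (m : Int) (r1 r2 : Nat)
    (h1le : r1 ≤ cum.length) (h2le : r2 ≤ cum.length)
    (h1a : ∀ j, j < r1 → cum.getD j 0 ≤ m) (h1b : ∀ j, r1 ≤ j → j < cum.length → m < cum.getD j 0)
    (h2a : ∀ j, j < r2 → cum.getD j 0 ≤ m) (h2b : ∀ j, r2 ≤ j → j < cum.length → m < cum.getD j 0) :
    r1 = r2 := by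
  by_contra hne
  rcases Nat.lt_or_ge r1 r2 with h | h
  · exact absurd (h2a r1 h) (not_le.mpr (h1b r1 (le_refl _) (by omega)))
  · have h' : r2 < r1 := by omega
    exact absurd (h1a r2 h') (not_le.mpr (h2b r2 (le_refl _) (by omega)))

-- ===== VERDICT (by name: the statement is the Claim_ definition above) =====
theorem trim_description_spec : Claim_equal_trim_description := by
  intro description max_length _
  unfold Spec_trim_description trim_description trim_description_alt
  simp only []
  rw [trimLoopA_eq]
  obtain ⟨fl, f1, f2⟩ := firstExceed_spec max_length ((PySem.Str.split? description ".").getD []) 0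
  have hmono : ∀ i j, i ≤ j → j < (cumLens ((PySem.Str.split? description ".").getD []) 0).length →
      (cumLens ((PySem.Str.split? description ".").getD []) 0).getD i 0 ≤
      (cumLens ((PySem.Str.split? description ".").getD []) 0).getD j 0 :=
    fun i j hij hj => cumLens_mono _ 0 i j hij (by rwa [cumLens_length] at hj)
  obtain ⟨b1, b2, bl⟩ := bsearchCount_spec (cumLens ((PySem.Str.split? description ".").getD []) 0)
    max_length hmono _ 0 (cumLens ((PySem.Str.split? description ".").getD []) 0).length
    (le_refl _) (by omega) (le_refl _)
    (fun j hj => by omega)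
    (fun j hj hjl => by omega)
  have hk : firstExceed max_length ((PySem.Str.split? description ".").getD []) 0 =
      bsearchCount (cumLens ((PySem.Str.split? description ".").getD []) 0) max_length 0
        (cumLens ((PySem.Str.split? description ".").getD []) 0).length := by
    apply spec_unique _ max_length _ _ (by rw [cumLens_length]; exact fl) bl f1
      (fun j hj hjl => f2 j hj (by rwa [cumLens_length] at hjl)) b1 b2
  rw [hk]
  simp [joinDots]
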